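-- pv_equiv track=rewrite | github.com/xenova/chat-downloader | chat_downloader/sites/common.py | _must_add_item
-- ===== SOURCE A (Python) =====
-- def _must_add_item(item, message_groups_dict, messages_groups_to_add, messages_types_to_add):
--
--     # Force mutual exclusion
--     if messages_types_to_add:
--         # messages_types is set
--         messages_groups_to_add = []
--
--     if 'all' in messages_groups_to_add or 'all' in messages_types_to_add:  # user wants everything
--         return True
--
--     valid_message_types = []
--     for message_group in messages_groups_to_add or []:
--         valid_message_types += message_groups_dict.get(message_group, [])
--
--     for message_type in messages_types_to_add or []:
--         valid_message_types.append(message_type)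
--
--     return item.get('message_type') in valid_message_types
-- ===== SOURCE B (Python) =====
-- def _must_add_item(item, message_groups_dict, messages_groups_to_add, messages_types_to_add):
--     # Mutual exclusion as an early-return branch: a non-empty types list decides alone.
--     if messages_types_to_add:
--         return ('all' in messages_types_to_add
--                 or item.get('message_type') in messages_types_to_add)
--     if 'all' in messages_groups_to_add:
--         return True
--     # Scan the dictionary itself once, instead of looking each requested group up:
--     # a pair contributes iff its key is among the requested groups.
--     target = item.get('message_type')
--     wanted = set(messages_groups_to_add)
--     return any(key in wanted and target in types
--                for key, types in message_groups_dict.items())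
-- ===== Notes on version B (the rewrite author's own statement) =====
-- stated objective: alternative
-- what changed: B inverts the traversal: instead of looping over the requested groups and concatenating each dict lookup into one valid_message_types list, it branches early on the types list and otherwise scans message_groups_dict.items() once against a set of requested group names, never performing a .get lookup or building the accumulated list.
import Mathlib
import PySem

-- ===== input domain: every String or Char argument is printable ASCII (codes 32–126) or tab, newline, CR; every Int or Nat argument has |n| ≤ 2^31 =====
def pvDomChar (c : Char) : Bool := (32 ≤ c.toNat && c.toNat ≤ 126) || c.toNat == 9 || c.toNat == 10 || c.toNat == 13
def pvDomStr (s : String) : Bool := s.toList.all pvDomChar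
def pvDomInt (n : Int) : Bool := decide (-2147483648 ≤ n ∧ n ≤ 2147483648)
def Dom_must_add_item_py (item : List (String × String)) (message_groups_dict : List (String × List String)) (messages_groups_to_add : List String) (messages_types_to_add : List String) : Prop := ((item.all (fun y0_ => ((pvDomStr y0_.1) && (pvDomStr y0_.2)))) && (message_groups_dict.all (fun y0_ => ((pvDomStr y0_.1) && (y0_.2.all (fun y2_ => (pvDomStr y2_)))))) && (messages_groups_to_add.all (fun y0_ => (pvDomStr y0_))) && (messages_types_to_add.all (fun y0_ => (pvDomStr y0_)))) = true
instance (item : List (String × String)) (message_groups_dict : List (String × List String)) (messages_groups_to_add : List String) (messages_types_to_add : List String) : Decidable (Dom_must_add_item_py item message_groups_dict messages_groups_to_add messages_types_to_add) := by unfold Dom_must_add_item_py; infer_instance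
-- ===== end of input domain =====

-- B branches early on the types list and otherwise scans message_groups_dict once against the
-- set of requested group names, never building A's accumulated valid_message_types list;
-- objective: alternative decomposition (inverted traversal).
-- ===== PORT A =====
def must_add_item_py (item : List (String × String)) (message_groups_dict : List (String × List String)) (messages_groups_to_add : List String) (messages_types_to_add : List String) : Bool :=
  -- force mutual exclusion: a non-empty messages_types_to_add clears the groups
  let messages_groups_to_add := if messages_types_to_add ≠ [] then [] else messages_groups_to_add
  if messages_groups_to_add.contains "all" || messages_types_to_add.contains "all" then true
  else
    let valid_message_types : List String :=
      messages_groups_to_add.foldl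
        (fun acc g => acc ++ (PySem.Dict.mk message_groups_dict).getD g []) []
    let valid_message_types :=
      messages_types_to_add.foldl (fun acc t => acc ++ [t]) valid_message_types
    -- 'item.get('message_type') in valid_message_types': None is never in a list of strings
    match (PySem.Dict.mk item).get? "message_type" with
    | some t => valid_message_types.contains t
    | none   => false

-- ===== PORT B =====
def must_add_item_py_alt (item : List (String × String)) (message_groups_dict : List (String × List String)) (messages_groups_to_add : List String) (messages_types_to_add : List String) : Bool :=
  if messages_types_to_add ≠ [] then
    -- 'all' in types, or item.get('message_type') in types (None matches no string)
    messages_types_to_add.contains "all" ||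
      (match (PySem.Dict.mk item).get? "message_type" with
       | some t => messages_types_to_add.contains t
       | none   => false)
  else if messages_groups_to_add.contains "all" then true
  else
    match (PySem.Dict.mk item).get? "message_type" with
    | none   => false   -- None is in no group's type list
    | some t =>
      let wanted := PySem.Set.ofList messages_groups_to_add
      message_groups_dict.any (fun p => wanted.contains p.1 && p.2.contains t)

-- ===== PRECONDITION & SPEC =====
-- Pre_ excludes association lists whose group keys repeat: a Python dict cannot hold duplicate
-- keys, and on such lists A's first-match lookup versus B's full scan of the pairs is an
-- accident of the encoding, not a behaviour of the Python programs (which agree there).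
def Pre_must_add_item_py (item : List (String × String)) (message_groups_dict : List (String × List String)) (messages_groups_to_add : List String) (messages_types_to_add : List String) : Prop :=
  (message_groups_dict.map Prod.fst).Nodup
instance (item : List (String × String)) (message_groups_dict : List (String × List String)) (messages_groups_to_add : List String) (messages_types_to_add : List String) : Decidable (Pre_must_add_item_py item message_groups_dict messages_groups_to_add messages_types_to_add) := by unfold Pre_must_add_item_py; infer_instance
def pvWitness_must_add_item_py : (List (String × String)) × (List (String × List String)) × List String × List String :=
  ([("message_type", "x")], [("g", ["x", "y"])], ["g"], [])
def Spec_must_add_item_py (item : List (String × String)) (message_groups_dict : List (String × List String)) (messages_groups_to_add : List String) (messages_types_to_add : List String) (out : Bool) : Prop := out = must_add_item_py_alt item message_groups_dict messages_groups_to_add messages_types_to_add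
instance (item : List (String × String)) (message_groups_dict : List (String × List String)) (messages_groups_to_add : List String) (messages_types_to_add : List String) (out : Bool) : Decidable (Spec_must_add_item_py item message_groups_dict messages_groups_to_add messages_types_to_add out) := by unfold Spec_must_add_item_py; infer_instance

-- ===== CLAIM (what is proved, stated in full; the proofs are below) =====
def Claim_equal_must_add_item_py : Prop := ∀ (item : List (String × String)) (message_groups_dict : List (String × List String)) (messages_groups_to_add : List String) (messages_types_to_add : List String), Dom_must_add_item_py item message_groups_dict messages_groups_to_add messages_types_to_add → Pre_must_add_item_py item message_groups_dict messages_groups_to_add messages_types_to_add → Spec_must_add_item_py item message_groups_dict messages_groups_to_add messages_types_to_add (must_add_item_py item message_groups_dict messages_groups_to_add messages_types_to_add)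

-- ===== LEMMAS AND PROOFS =====

-- A's accumulated membership equals B's dict scan, given unique group keys.
theorem groups_scan_eq (mgd : List (String × List String)) (groups : List String) (t : String)
    (h : (mgd.map Prod.fst).Nodup) :
    (groups.foldl (fun acc g => acc ++ (PySem.Dict.mk mgd).getD g []) []).contains t
      = mgd.any (fun p => (PySem.Set.ofList groups).contains p.1 && p.2.contains t) := by
  rw [PySem.List.foldl_append_eq_flatMap, Bool.eq_iff_iff]
  simp only [List.nil_append, List.contains_eq_mem, decide_eq_true_eq, List.any_eq_true,
    Bool.and_eq_true, List.mem_flatMap, PySem.Set.contains_eq_listContains,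
    PySem.Set.mem_ofList]
  constructor
  · rintro ⟨g, hg, ht⟩
    rcases h2 : (PySem.Dict.mk mgd).get? g with _ | v
    · rw [PySem.Dict.getD_of_get?_eq_none _ _ h2] at ht
      exact absurd ht List.not_mem_nil
    · rw [PySem.Dict.getD_of_get?_eq_some _ _ h2] at ht
      exact ⟨(g, v), PySem.Dict.mem_items_of_get?_eq_some _ h2, hg, ht⟩
  · rintro ⟨⟨g, v⟩, hm, hg, ht⟩
    refine ⟨g, hg, ?_⟩
    rw [PySem.Dict.getD_of_mem_items _ hm (by simpa [PySem.Dict.keys] using h)]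
    exact ht

-- ===== VERDICT (by name: the statement is the Claim_ definition above) =====
theorem must_add_item_py_spec : Claim_equal_must_add_item_py := by
  intro item mgd groups types _ hpre
  unfold Spec_must_add_item_py must_add_item_py must_add_item_py_alt
  by_cases hty : types = []
  · subst hty
    simp only [ne_eq, not_true_eq_false, if_false, List.contains_nil, Bool.or_false,
      List.foldl_nil]
    by_cases hall : "all" ∈ groups
    · simp [hall]
    · simp only [List.contains_eq_mem, hall, decide_false, Bool.false_eq_true, if_false]
      cases hget : (PySem.Dict.mk item).get? "message_type" with
      | none => rfl
      | some t =>
        have := groups_scan_eq mgd groups t hpre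
        simpa [List.contains_eq_mem] using this
  · simp only [ne_eq, hty, not_false_eq_true, if_pos, List.contains_nil,
      Bool.false_or, List.foldl_nil]
    by_cases hall : "all" ∈ types
    · simp [hall]
    · simp only [List.contains_eq_mem, hall, decide_false, Bool.false_eq_true, if_false,
        Bool.false_or]
      cases hget : (PySem.Dict.mk item).get? "message_type" with
      | none => rfl
      | some t => simp
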